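-- pv_equiv track=rewrite | github.com/snu-python/pythonbook | exercise/ex10_3.py | switch_somecase2
-- ===== SOURCE A (Python) =====
-- def switch_somecase2(text):
--     """특정 영어 문자(A, B, C, D)의 대문자를 소문자로, 소문자를 대문자로 바꾼
--     새로운 문자열을 반환하는 함수다.
--
--     text...: 알파벳 문자열
--     Returns: 특정 대소문자를 반전한 알파벳 문자열
--     """
--     switch_case = set('ABCDabcd')       # 대소문자 반전할 문자들을 세트로 선언한다.
--     switched_text = []                  # 대소문자를 반전한 문자들을 담을 리스트를 초기화한다.
--
--     for char in text:
--         # 문자가 A', 'B', 'C', 'D', 'a', 'b', 'c', 'd' 중 하나면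
--         if char in switch_case:
--             # 문자 char가 소문자면 대문자로, 대문자면 소문자로 바꾸어 switched_text에 추가한다.
--             switched_text.append(char.swapcase())
--         else:                           # 그 외 문자이면
--             switched_text.append(char)  # switched_text에 그대로 추가한다.
--
--     # switched_text에 있는 모든 문자열 객체를 빈칸으로 결합해서 반환한다.
--     return ''.join(switched_text)
-- ===== SOURCE B (Python) =====
-- def switch_somecase2(text):
--     """Staged whole-string replace passes: for each letter pair, route the
--     uppercase letter through a placeholder so the opposite replace cannot
--     undo it.  Correct for the documented domain (alphabet/printable text,
--     which never contains the NUL placeholder)."""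
--     for up, low in zip('ABCD', 'abcd'):
--         text = text.replace(up, '\x00').replace(low, up).replace('\x00', low)
--     return text
-- ===== Notes on version B (the rewrite author's own statement) =====
-- stated objective: faster
-- what changed: Replaces A's single per-character conditional pass with four staged whole-string str.replace rounds, each swapping one letter pair via a NUL placeholder so the opposite replace cannot undo it; no per-character branch or membership test remains.
import Mathlib
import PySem

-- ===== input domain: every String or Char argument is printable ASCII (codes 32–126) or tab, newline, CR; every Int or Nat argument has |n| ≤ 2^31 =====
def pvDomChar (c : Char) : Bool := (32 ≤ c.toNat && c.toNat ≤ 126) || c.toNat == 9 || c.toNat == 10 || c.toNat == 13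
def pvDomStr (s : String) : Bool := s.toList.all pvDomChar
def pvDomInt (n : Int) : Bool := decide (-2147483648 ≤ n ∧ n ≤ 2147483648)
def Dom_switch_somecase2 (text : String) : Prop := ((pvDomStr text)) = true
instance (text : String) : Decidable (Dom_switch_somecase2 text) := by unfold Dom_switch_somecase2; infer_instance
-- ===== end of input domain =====

-- B swaps the four letter pairs by staged whole-string replace rounds through a NUL placeholder instead of A's per-character conditional pass.

-- str.swapcase() on a single character, exact for ASCII (the only chars it is applied to here)
def pySwapcaseChar (c : Char) : Char :=
  if 97 ≤ c.toNat ∧ c.toNat ≤ 122 then Char.ofNat (c.toNat - 32)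
  else if 65 ≤ c.toNat ∧ c.toNat ≤ 90 then Char.ofNat (c.toNat + 32)
  else c

-- ===== PORT A =====
def switch_somecase2 (text : String) : String :=
  let switch_case := PySem.Set.ofList "ABCDabcd".toList
  let switched_text :=
    text.toList.foldl
      (fun acc ch =>
        if ch ∈ switch_case then acc ++ [pySwapcaseChar ch]
        else acc ++ [ch]) []
  String.ofList switched_text

-- ===== PORT B =====
def switch_somecase2_alt (text : String) : String :=
  (List.zip "ABCD".toList "abcd".toList).foldl
    (fun t p =>
      PySem.Str.replace
        (PySem.Str.replace
          (PySem.Str.replace t (String.ofList [p.1]) (String.ofList ['\x00']))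
          (String.ofList [p.2]) (String.ofList [p.1]))
        (String.ofList ['\x00']) (String.ofList [p.2]))
    text

-- ===== PRECONDITION & SPEC =====
def Spec_switch_somecase2 (text : String) (out : String) : Prop := out = switch_somecase2_alt text
instance (text : String) (out : String) : Decidable (Spec_switch_somecase2 text out) := by unfold Spec_switch_somecase2; infer_instance

-- ===== CLAIM (what is proved, stated in full; the proofs are below) =====
def Claim_equal_switch_somecase2 : Prop := ∀ (text : String), Dom_switch_somecase2 text → Spec_switch_somecase2 text (switch_somecase2 text)

-- ===== LEMMAS AND PROOFS =====

-- single-character replace is a character map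
theorem go_single (a b : Char) (s acc : List Char) :
    PySem.Chars.replace.go [a] [b] s.length s acc
      = acc.reverse ++ s.map (fun c => if c = a then b else c) := by
  induction s generalizing acc with
  | nil => simp [PySem.Chars.replace.go]
  | cons c t ih =>
    by_cases h : c = a
    · subst h
      simp [PySem.Chars.replace.go, List.isPrefixOf, ih]
    · simp [PySem.Chars.replace.go, List.isPrefixOf, h, Ne.symm h, ih]

theorem replace_single (a b : Char) (s : List Char) :
    PySem.Chars.replace s [a] [b] = s.map (fun c => if c = a then b else c) := by
  simp [PySem.Chars.replace, go_single]

-- ===== VERDICT (by name: the statement is the Claim_ definition above) =====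
theorem switch_somecase2_spec : Claim_equal_switch_somecase2 := by
  intro text hdom
  unfold Spec_switch_somecase2 switch_somecase2 switch_somecase2_alt
  -- A side: the accumulator loop is a map
  have hstep : (fun (acc : List Char) ch =>
      if ch ∈ PySem.Set.ofList "ABCDabcd".toList then acc ++ [pySwapcaseChar ch]
      else acc ++ [ch])
    = (fun acc ch => acc ++
        [if ch ∈ PySem.Set.ofList "ABCDabcd".toList then pySwapcaseChar ch else ch]) := by
    funext acc ch; split_ifs <;> rfl
  simp only [hstep, PySem.List.foldl_append_singleton_eq_map, List.nil_append]
  -- B side: unfold the four rounds of replaces into one composed map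
  have hz : List.zip "ABCD".toList "abcd".toList = [('A','a'),('B','b'),('C','c'),('D','d')] := by
    decide
  rw [hz]
  simp only [List.foldl]
  rw [← String.toList_inj]
  simp only [PySem.Str.toList_replace, String.toList_ofList, replace_single, List.map_map]
  -- pointwise agreement on domain characters
  apply List.map_congr_left
  intro c hc
  have hdc : pvDomChar c = true := (List.all_eq_true.mp hdom) c hc
  have hne : c ≠ '\x00' := by
    intro h; subst h; simp [pvDomChar] at hdc
  by_cases hA : c = 'A'; · subst hA; decide
  by_cases hB : c = 'B'; · subst hB; decide
  by_cases hC : c = 'C'; · subst hC; decide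
  by_cases hD : c = 'D'; · subst hD; decide
  by_cases ha : c = 'a'; · subst ha; decide
  by_cases hb : c = 'b'; · subst hb; decide
  by_cases hcc : c = 'c'; · subst hcc; decide
  by_cases hd : c = 'd'; · subst hd; decide
  simp [Function.comp, PySem.Set.mem_ofList, hne, hA, hB, hC, hD, ha, hb, hcc, hd]
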